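-- pv_equiv track=rewrite | github.com/hbourmorck/AoC2021 | src/prog12.py | getocc
-- ===== SOURCE A (Python) =====
-- def getocc(path):
--   occone = set()
--   occtwo = set()
--
--   for p in path:
--     c = path.count(p)
--     if c == 1 and p.islower():
--       occone.add(p)
--     elif c >= 2 and p.islower():
--       occtwo.add(p)
--
--   return occone, occtwo
-- ===== SOURCE B (Python) =====
-- def getocc(path):
--   occone = set()
--   occtwo = set()
--   seen = set()
--   rest = path
--   while rest:
--     p, rest = rest[0], rest[1:]
--     if p.islower() and p not in seen:
--       seen.add(p)
--       if p in rest: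
--         occtwo.add(p)
--       else:
--         occone.add(p)
--   return occone, occtwo
-- ===== Notes on version B (the rewrite author's own statement) =====
-- stated objective: alternative
-- what changed: B never counts: a while-loop consumes the suffix, classifies each lowercase node once at its first unseen occurrence by whether it appears again in the remaining suffix (short-circuiting membership), and skips all later occurrences via a seen-set.
import Mathlib
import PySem

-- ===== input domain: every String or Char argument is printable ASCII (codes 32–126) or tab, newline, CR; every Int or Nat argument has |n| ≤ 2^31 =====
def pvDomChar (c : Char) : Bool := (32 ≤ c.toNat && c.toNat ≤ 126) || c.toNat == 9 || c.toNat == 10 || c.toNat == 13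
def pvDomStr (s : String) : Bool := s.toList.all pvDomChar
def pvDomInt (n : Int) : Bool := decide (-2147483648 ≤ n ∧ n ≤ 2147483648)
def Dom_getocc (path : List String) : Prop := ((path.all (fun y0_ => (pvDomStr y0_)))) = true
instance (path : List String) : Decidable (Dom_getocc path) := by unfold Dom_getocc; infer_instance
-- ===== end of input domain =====

-- B never counts: a while-loop consumes the suffix and classifies each lowercase node once, at its
-- first unseen occurrence, by whether it occurs again in the remaining suffix (alternative decomposition).

-- ===== PORT A =====
-- Python str.islower(): some cased character and no uppercase one (exact on the ASCII domain; PySem has only the per-char tests)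
def pyIslower (s : String) : Bool :=
  s.toList.any PySem.Chars.islower && !s.toList.any PySem.Chars.isupper

def getocc (path : List String) : List String × List String :=
  path.foldl
    (fun (st : PySem.Set String × PySem.Set String) p =>
      let c := PySem.List.count path p
      if c == 1 && pyIslower p then (PySem.Set.add st.1 p, st.2)
      else if decide (2 ≤ c) && pyIslower p then (st.1, PySem.Set.add st.2 p)
      else st)
    ([], [])

-- ===== PORT B =====
-- the while-loop of Source B: state (seen, occone, occtwo), consuming the suffix `rest`
def getoccGo (seen occone occtwo : PySem.Set String) : List String → List String × List String
  | [] => (occone, occtwo)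
  | p :: rest =>
    if pyIslower p && !(PySem.Set.contains seen p) then
      if rest.contains p then getoccGo (PySem.Set.add seen p) occone (PySem.Set.add occtwo p) rest
      else getoccGo (PySem.Set.add seen p) (PySem.Set.add occone p) occtwo rest
    else getoccGo seen occone occtwo rest

def getocc_alt (path : List String) : List String × List String :=
  getoccGo [] [] [] path

-- ===== PRECONDITION & SPEC =====
def Spec_getocc (path : List String) (out : List String × List String) : Prop := out = getocc_alt path
instance (path : List String) (out : List String × List String) : Decidable (Spec_getocc path out) := by unfold Spec_getocc; infer_instance

-- ===== CLAIM (what is proved, stated in full; the proofs are below) =====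
def Claim_equal_getocc : Prop := ∀ (path : List String), Dom_getocc path → Spec_getocc path (getocc path)

-- ===== LEMMAS AND PROOFS =====

-- "unseen lowercase node of cur whose multiplicity in cur satisfies C"
def pvQ (C : Nat → Bool) (cur seen : List String) (q : String) : Bool :=
  pyIslower q && !(seen.contains q) && C (PySem.List.count cur q)

def pvC1 : Nat → Bool := fun n => n == 1
def pvC2 : Nat → Bool := fun n => decide (2 ≤ n)

-- filtering commutes through a Set.add fold (so dedup commutes with filter)
lemma pv_filter_foldl_add (q : String → Bool) (xs : List String) :
    ∀ s : List String, (xs.foldl PySem.Set.add s).filter q = (xs.filter q).foldl PySem.Set.add (s.filter q) := by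
  induction xs with
  | nil => intro s; rfl
  | cons x xs ih =>
    intro s
    rw [List.foldl_cons, ih (PySem.Set.add s x), List.filter_cons]
    by_cases hq : q x
    · simp only [hq, if_pos, List.foldl_cons]
      congr 1
      rw [PySem.Set.add_eq_ite, PySem.Set.add_eq_ite]
      by_cases hm : x ∈ s
      · simp [hm, List.mem_filter, hq]
      · simp [hm, List.mem_filter, hq, List.filter_append]
    · simp only [hq, if_neg, Bool.false_eq_true, not_false_iff]
      congr 1
      rw [PySem.Set.add_eq_ite]
      by_cases hm : x ∈ s
      · simp [hm]
      · simp [hm, List.filter_append, hq]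

lemma pv_ofList_filter (q : String → Bool) (xs : List String) :
    (PySem.Set.ofList xs).filter q = PySem.Set.ofList (xs.filter q) := by
  rw [PySem.Set.ofList_eq_foldl, PySem.Set.ofList_eq_foldl]
  simpa using pv_filter_foldl_add q xs []

-- A's fold equals the canonical pair: dedup(path) filtered by the two predicates (nothing seen)
lemma pv_A_eq (path : List String) :
    getocc path = ((PySem.Set.ofList path).filter (pvQ pvC1 path []),
                   (PySem.Set.ofList path).filter (pvQ pvC2 path [])) := by
  unfold getocc
  have hstep : (fun (st : PySem.Set String × PySem.Set String) p =>
      let c := PySem.List.count path p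
      if c == 1 && pyIslower p then (PySem.Set.add st.1 p, st.2)
      else if decide (2 ≤ c) && pyIslower p then (st.1, PySem.Set.add st.2 p)
      else st)
    = (fun (st : PySem.Set String × PySem.Set String) p =>
      (if pvQ pvC1 path [] p then PySem.Set.add st.1 p else st.1,
       if pvQ pvC2 path [] p then PySem.Set.add st.2 p else st.2)) := by
    funext st p
    dsimp only [pvQ, pvC1, pvC2]
    simp only [List.contains_nil, Bool.not_false, Bool.and_true, Bool.and_eq_true,
      beq_iff_eq, decide_eq_true_eq, PySem.List.count_eq]
    by_cases hc : List.count p path = 1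
    · have h2 : ¬ (2 ≤ List.count p path) := by omega
      by_cases hl : pyIslower p <;> simp [hc, hl, h2]
    · by_cases hl : pyIslower p <;> by_cases h2 : 2 ≤ List.count p path <;> simp [hc, hl, h2]
  rw [hstep]
  rw [PySem.List.foldl_prod_mk (f := fun acc p => if pvQ pvC1 path [] p then PySem.Set.add acc p else acc)
        (g := fun acc p => if pvQ pvC2 path [] p then PySem.Set.add acc p else acc)]
  rw [PySem.List.foldl_if_eq_foldl_filter (pvQ pvC1 path []) PySem.Set.add,
      PySem.List.foldl_if_eq_foldl_filter (pvQ pvC2 path []) PySem.Set.add]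
  rw [pv_ofList_filter, pv_ofList_filter]
  rw [PySem.Set.ofList_eq_foldl, PySem.Set.ofList_eq_foldl]

lemma pv_discard_eq_filter (s : PySem.Set String) (x : String) :
    PySem.Set.discard s x = s.filter (fun y => !(y == x)) := by
  simp [PySem.Set.discard]

-- stepping past an unseen p: the tail filter over the deduplicated rest, with p newly seen
lemma pv_step_unseen (C : Nat → Bool) (p : String) (rest seen : List String) :
    ((PySem.Set.ofList rest).filter (fun y => !(y == p))).filter (pvQ C (p :: rest) seen)
      = (PySem.Set.ofList rest).filter (pvQ C rest (PySem.Set.add seen p)) := by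
  rw [List.filter_filter]
  refine List.filter_congr (fun q _ => ?_)
  by_cases hqp : q = p
  · subst hqp
    have : (PySem.Set.add seen q).contains q = true := by
      rw [PySem.Set.contains_eq_listContains]
      simp [PySem.Set.add_eq_ite]; split <;> simp_all
    simp [pvQ, this]
  · simp [pvQ, hqp, List.count_cons, Ne.symm hqp]

-- skipping p (not lowercase, or already seen): the whole filtered dedup is unchanged
lemma pv_step_skip (C : Nat → Bool) (p : String) (rest seen : List String)
    (hp : pyIslower p = false ∨ p ∈ seen) :
    (PySem.Set.ofList (p :: rest)).filter (pvQ C (p :: rest) seen)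
      = (PySem.Set.ofList rest).filter (pvQ C rest seen) := by
  have hpf : pvQ C (p :: rest) seen p = false := by
    rcases hp with h | h
    · simp [pvQ, h]
    · simp [pvQ, List.elem_eq_contains, h]
  rw [PySem.Set.ofList_cons, pv_discard_eq_filter, List.filter_cons, hpf]
  simp only [Bool.false_eq_true, if_neg, not_false_iff, if_false]
  rw [List.filter_filter]
  refine List.filter_congr (fun q _ => ?_)
  by_cases hqp : q = p
  · subst hqp
    have : pvQ C rest seen q = false := by
      rcases hp with h | h
      · simp [pvQ, h]
      · simp [pvQ, List.elem_eq_contains, h]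
    simp [this, hpf]
  · simp [pvQ, hqp, List.count_cons, Ne.symm hqp]

-- the invariant of B's loop: everything already classified is seen, and the loop appends exactly
-- the unseen lowercase nodes of the remaining suffix, split by their multiplicity there
lemma pv_goB_eq (cur : List String) :
    ∀ (seen one two : List String), (∀ q, q ∈ one ∨ q ∈ two → q ∈ seen) →
      getoccGo seen one two cur =
        (one ++ (PySem.Set.ofList cur).filter (pvQ pvC1 cur seen),
         two ++ (PySem.Set.ofList cur).filter (pvQ pvC2 cur seen)) := by
  induction cur with
  | nil => intro seen one two _; simp [getoccGo, PySem.Set.ofList]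
  | cons p rest ih =>
    intro seen one two hinv
    rw [getoccGo]
    by_cases hl : pyIslower p
    · by_cases hs : p ∈ seen
      · have hsc : PySem.Set.contains seen p = true := by
          rw [PySem.Set.contains_eq_listContains]; simp [List.elem_eq_contains, hs]
        simp only [hl, hsc, Bool.not_true, Bool.and_false, Bool.false_eq_true, if_neg, not_false_iff]
        rw [ih seen one two hinv, pv_step_skip _ _ _ _ (Or.inr hs), pv_step_skip _ _ _ _ (Or.inr hs)]
      · have hsc : PySem.Set.contains seen p = false := by
          rw [PySem.Set.contains_eq_listContains]
          simp [List.elem_eq_contains]; exact hs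
        simp only [hl, hsc, Bool.not_false, Bool.and_true, Bool.true_and, if_pos]
        have hseen' : ∀ q, q ∈ one ∨ q ∈ two ∨ q = p → q ∈ PySem.Set.add seen p := by
          intro q hq
          rw [PySem.Set.add_eq_ite]
          rcases hq with h | h | h
          · have := hinv q (Or.inl h); split <;> simp [this]
          · have := hinv q (Or.inr h); split <;> simp [this]
          · subst h; split <;> simp_all
        have hhead : ∀ C, pvQ C (p :: rest) seen p = C (PySem.List.count rest p + 1) := by
          intro C; simp [pvQ, List.elem_eq_contains, hs, hl, List.count_cons]
        rw [PySem.Set.ofList_cons, pv_discard_eq_filter, List.filter_cons, List.filter_cons,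
          hhead pvC1, hhead pvC2]
        by_cases hm : p ∈ rest
        · have hmc : rest.contains p = true := by simp [List.elem_eq_contains, hm]
          rw [if_pos hmc]
          have htwo : PySem.Set.add two p = two ++ [p] :=
            PySem.Set.add_of_not_mem (fun h => hs (hinv p (Or.inr h)))
          rw [ih (PySem.Set.add seen p) one (PySem.Set.add two p)
              (fun q hq => hseen' q (by
                simp only [PySem.Set.mem_add] at hq; tauto)), htwo]
          have hpos : 1 ≤ List.count p rest := List.count_pos_iff.mpr hm
          have h1 : pvC1 (PySem.List.count rest p + 1) = false := by
            simp [pvC1, PySem.List.count_eq]; omega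
          have h2 : pvC2 (PySem.List.count rest p + 1) = true := by
            simp [pvC2, PySem.List.count_eq]; omega
          rw [h1, h2]
          simp only [Bool.false_eq_true, if_neg, not_false_iff, if_false, if_true]
          rw [pv_step_unseen, pv_step_unseen]
          simp
        · have hmc : rest.contains p = false := by simpa using hm
          rw [if_neg (by simp [hm])]
          have hone : PySem.Set.add one p = one ++ [p] :=
            PySem.Set.add_of_not_mem (fun h => hs (hinv p (Or.inl h)))
          rw [ih (PySem.Set.add seen p) (PySem.Set.add one p) two
              (fun q hq => hseen' q (by
                simp only [PySem.Set.mem_add] at hq; tauto)), hone]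
          have hzero : List.count p rest = 0 := List.count_eq_zero.mpr hm
          have h1 : pvC1 (PySem.List.count rest p + 1) = true := by
            simp [pvC1, PySem.List.count_eq, hzero]
          have h2 : pvC2 (PySem.List.count rest p + 1) = false := by
            simp [pvC2, PySem.List.count_eq, hzero]
          rw [h1, h2]
          simp only [Bool.false_eq_true, if_neg, not_false_iff, if_false, if_true]
          rw [pv_step_unseen, pv_step_unseen]
          simp
    · simp only [hl, Bool.false_and, Bool.false_eq_true, if_neg, not_false_iff]
      rw [ih seen one two hinv, pv_step_skip _ _ _ _ (Or.inl (by simpa using hl)),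
        pv_step_skip _ _ _ _ (Or.inl (by simpa using hl))]

-- ===== VERDICT (by name: the statement is the Claim_ definition above) =====
theorem getocc_spec : Claim_equal_getocc := by
  intro path _
  unfold Spec_getocc getocc_alt
  rw [pv_A_eq, pv_goB_eq path [] [] [] (by simp)]
  simp
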